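-- pv_equiv track=rewrite | github.com/DoukanK67/Kriptoloji-Proje | app.py | route_decrypt
-- ===== SOURCE A (Python) =====
-- def route_decrypt(cipher: str, rows: int, cols: int, direction: str = "spiral") -> str:
--   """Route deşifreleme - şifreli metni grid'e spiral rotada yerleştirip normal okur"""
--   if rows < 1 or cols < 1:
--     return cipher
--
--   grid_size = rows * cols
--   if len(cipher) < grid_size:
--     cipher = cipher.ljust(grid_size, "X")
--   elif len(cipher) > grid_size:
--     cipher = cipher[:grid_size]
--
--   # Grid oluştur
--   grid = [[None for _ in range(cols)] for _ in range(rows)]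
--   visited = [[False for _ in range(cols)] for _ in range(rows)]
--
--   # Şifreli metni spiral rotada grid'e yerleştir
--   directions = [(0, 1), (1, 0), (0, -1), (-1, 0)]
--   dir_idx = 0
--   row, col = 0, 0
--
--   for i, ch in enumerate(cipher):
--     grid[row][col] = ch
--     visited[row][col] = True
--
--     if i < len(cipher) - 1:
--       next_row = row + directions[dir_idx][0]
--       next_col = col + directions[dir_idx][1]
--
--       if (next_row < 0 or next_row >= rows or
--           next_col < 0 or next_col >= cols or
--           visited[next_row][next_col]):
--         dir_idx = (dir_idx + 1) % 4
--         next_row = row + directions[dir_idx][0]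
--         next_col = col + directions[dir_idx][1]
--
--       row, col = next_row, next_col
--
--   # Grid'i normal şekilde oku (soldan sağa, yukarıdan aşağıya)
--   result = []
--   for i in range(rows):
--     for j in range(cols):
--       if grid[i][j]:
--         result.append(grid[i][j])
--
--   return "".join(result).rstrip("X")
-- ===== SOURCE B (Python) =====
-- def route_decrypt(cipher: str, rows: int, cols: int, direction: str = "spiral") -> str:
--     if rows < 1 or cols < 1:
--         return cipher
--     n = rows * cols
--     cipher = cipher[:n].ljust(n, "X")
--     # spiral coordinates by layer peeling (no visited matrix, no turning logic)
--     coords = []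
--     top, bottom, left, right = 0, rows - 1, 0, cols - 1
--     while top <= bottom and left <= right:
--         for c in range(left, right + 1):
--             coords.append((top, c))
--         for r in range(top + 1, bottom + 1):
--             coords.append((r, right))
--         if top < bottom:
--             for c in range(right - 1, left - 1, -1):
--                 coords.append((bottom, c))
--         if left < right:
--             for r in range(bottom - 1, top, -1):
--                 coords.append((r, left))
--         top += 1
--         bottom -= 1
--         left += 1
--         right -= 1
--     grid = [[None] * cols for _ in range(rows)]
--     for (r, c), ch in zip(coords, cipher):
--         grid[r][c] = ch
--     return "".join(ch for row in grid for ch in row if ch is not None).rstrip("X")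
-- ===== Notes on version B (the rewrite author's own statement) =====
-- stated objective: simpler
-- what changed: B replaces A's visited-matrix simulation with direction vectors and turn-on-blocked logic by a layer-peeling generator of the spiral coordinate sequence (shrinking top/bottom/left/right bounds), then assigns the padded cipher along those coordinates and reads the grid row-major.
import Mathlib
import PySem

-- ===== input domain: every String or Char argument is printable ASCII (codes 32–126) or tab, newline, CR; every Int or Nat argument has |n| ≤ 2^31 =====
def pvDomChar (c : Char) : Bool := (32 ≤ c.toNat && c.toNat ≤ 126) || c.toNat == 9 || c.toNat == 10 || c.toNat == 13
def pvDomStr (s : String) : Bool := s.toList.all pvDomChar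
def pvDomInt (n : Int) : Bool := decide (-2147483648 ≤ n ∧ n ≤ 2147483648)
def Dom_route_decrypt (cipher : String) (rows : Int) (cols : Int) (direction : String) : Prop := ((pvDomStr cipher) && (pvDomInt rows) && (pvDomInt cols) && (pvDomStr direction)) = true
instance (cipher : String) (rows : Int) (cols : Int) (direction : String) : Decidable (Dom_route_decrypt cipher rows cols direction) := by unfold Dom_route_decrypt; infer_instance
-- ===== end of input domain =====

-- B replaces A's visited-matrix walk with a layer-peeling spiral coordinate generator (objective: simpler; same O(rows*cols) cost).

-- shared low-level helpers: Python nested list read grid[i][j] / write grid[i][j] = v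
-- (indices are provably in range 0 ≤ i < len in both programs, so the total pyGetD/pySetD forms are exact here)
def pvGet2 {α : Type} (g : List (List α)) (i j : Int) (d : α) : α :=
  PySem.List.pyGetD (PySem.List.pyGetD g i []) j d

def pvSet2 {α : Type} (g : List (List α)) (i j : Int) (v : α) : List (List α) :=
  PySem.List.pySetD g i (PySem.List.pySetD (PySem.List.pyGetD g i []) j v)

-- ''.join(result).rstrip("X"): strip trailing 'X' characters (hand port, exact)
def pvRstripX (cs : List Char) : List Char :=
  (cs.reverse.dropWhile (fun c => c == 'X')).reverse

-- ===== PORT A =====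
def pvDirs : List (Int × Int) := [(0, 1), (1, 0), (0, -1), (-1, 0)]

-- the body of A's 'for i, ch in enumerate(cipher)' loop; 'i < len(cipher) - 1' = 'rest is nonempty'
def pvLoopA (rows cols : Int) :
    List Char → List (List (Option Char)) → List (List Bool) → Int → Int → Int → List (List (Option Char))
  | [], grid, _, _, _, _ => grid
  | ch :: rest, grid, visited, row, col, dirIdx =>
    let grid' := pvSet2 grid row col (some ch)
    let visited' := pvSet2 visited row col true
    match rest with
    | [] => grid'
    | _ :: _ =>
      let d := PySem.List.pyGetD pvDirs dirIdx (0, 0)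
      let nr := row + d.1
      let nc := col + d.2
      if nr < 0 ∨ nr ≥ rows ∨ nc < 0 ∨ nc ≥ cols ∨ pvGet2 visited' nr nc false = true then
        let dirIdx' := PySem.Int.mod (dirIdx + 1) 4
        let d' := PySem.List.pyGetD pvDirs dirIdx' (0, 0)
        pvLoopA rows cols rest grid' visited' (row + d'.1) (col + d'.2) dirIdx'
      else
        pvLoopA rows cols rest grid' visited' nr nc dirIdx

def route_decrypt (cipher : String) (rows : Int) (cols : Int) (direction : String) : String :=
  if rows < 1 ∨ cols < 1 then cipher
  else
    let gridSize := rows * cols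
    let cs0 := cipher.toList
    -- cipher.ljust(grid_size, "X") / cipher[:grid_size]  (ljust hand-ported as pad with 'X'; exact)
    let cs := if (cs0.length : Int) < gridSize then cs0 ++ List.replicate (gridSize - cs0.length).toNat 'X'
              else if (cs0.length : Int) > gridSize then PySem.List.slice cs0 none (some gridSize)
              else cs0
    let grid : List (List (Option Char)) :=
      (PySem.List.pyRange 0 rows 1).map (fun _ => (PySem.List.pyRange 0 cols 1).map (fun _ => (none : Option Char)))
    let visited : List (List Bool) :=
      (PySem.List.pyRange 0 rows 1).map (fun _ => (PySem.List.pyRange 0 cols 1).map (fun _ => false))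
    let final := pvLoopA rows cols cs grid visited 0 0 0
    -- read row-major; 'if grid[i][j]' skips unfilled (None) cells, a 1-char string is always truthy
    let res := (PySem.List.pyRange 0 rows 1).foldl (fun acc i =>
      (PySem.List.pyRange 0 cols 1).foldl (fun acc j =>
        match pvGet2 final i j none with
        | some c => acc ++ [c]
        | none => acc) acc) []
    String.ofList (pvRstripX res)

-- ===== PORT B =====
-- spiral coordinates by layer peeling (Source B's while loop with shrinking bounds)
def pvSpiralFuel : Nat → Int → Int → Int → Int → List (Int × Int)
  | 0, _, _, _, _ => []
  | fuel + 1, top, bottom, left, right =>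
    if top ≤ bottom ∧ left ≤ right then
      ((PySem.List.pyRange left (right + 1) 1).map (fun c => (top, c)))
      ++ ((PySem.List.pyRange (top + 1) (bottom + 1) 1).map (fun r => (r, right)))
      ++ (if top < bottom then (PySem.List.pyRange (right - 1) (left - 1) (-1)).map (fun c => (bottom, c)) else [])
      ++ (if left < right then (PySem.List.pyRange (bottom - 1) top (-1)).map (fun r => (r, left)) else [])
      ++ pvSpiralFuel fuel (top + 1) (bottom - 1) (left + 1) (right - 1)
    else []

-- the while loop, made total by a fuel bound that dominates the number of layers
def pvSpiralGo (top bottom left right : Int) : List (Int × Int) :=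
  pvSpiralFuel (bottom - top + (right - left) + 2).toNat top bottom left right

def route_decrypt_alt (cipher : String) (rows : Int) (cols : Int) (direction : String) : String :=
  if rows < 1 ∨ cols < 1 then cipher
  else
    let n := rows * cols
    -- cipher[:n].ljust(n, "X")  (ljust hand-ported as pad with 'X'; exact: no-op when already length n)
    let cs1 := PySem.List.slice cipher.toList none (some n)
    let cs := cs1 ++ List.replicate (n - cs1.length).toNat 'X'
    let coords := pvSpiralGo 0 (rows - 1) 0 (cols - 1)
    let grid : List (List (Option Char)) :=
      (PySem.List.pyRange 0 rows 1).map (fun _ => List.replicate cols.toNat (none : Option Char))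
    let grid := (coords.zip cs).foldl (fun g q => pvSet2 g q.1.1 q.1.2 (some q.2)) grid
    String.ofList (pvRstripX (grid.foldl (fun acc row => acc ++ row.filterMap id) []))

-- ===== PRECONDITION & SPEC =====
def Spec_route_decrypt (cipher : String) (rows : Int) (cols : Int) (direction : String) (out : String) : Prop := out = route_decrypt_alt cipher rows cols direction
instance (cipher : String) (rows : Int) (cols : Int) (direction : String) (out : String) : Decidable (Spec_route_decrypt cipher rows cols direction out) := by unfold Spec_route_decrypt; infer_instance

-- ===== CLAIM (what is proved, stated in full; the proofs are below) =====
def Claim_equal_route_decrypt : Prop := ∀ (cipher : String) (rows : Int) (cols : Int) (direction : String), Dom_route_decrypt cipher rows cols direction → Spec_route_decrypt cipher rows cols direction (route_decrypt cipher rows cols direction)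

-- ===== LEMMAS AND PROOFS =====

-- ---- spiral suffix machinery: the four mid-segment tails of a layer ----
def pvTail3 (t b l r q : Int) : List (Int × Int) :=
  (if l < r then (PySem.List.pyRange q t (-1)).map (fun x => (x, l)) else [])
  ++ pvSpiralGo (t + 1) (b - 1) (l + 1) (r - 1)

def pvTail2 (t b l r q : Int) : List (Int × Int) :=
  (if t < b then (PySem.List.pyRange q (l - 1) (-1)).map (fun x => (b, x)) else [])
  ++ pvTail3 t b l r (b - 1)

def pvTail1 (t b l r q : Int) : List (Int × Int) :=
  ((PySem.List.pyRange q (b + 1) 1).map (fun x => (x, r))) ++ pvTail2 t b l r (r - 1)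

def pvTail0 (t b l r q : Int) : List (Int × Int) :=
  ((PySem.List.pyRange q (r + 1) 1).map (fun x => (t, x))) ++ pvTail1 t b l r (t + 1)

def pvSfx : Nat → Int → Int → Int → Int → Int → List (Int × Int)
  | 0, t, b, l, r, p => pvTail0 t b l r p
  | 1, t, b, l, r, p => pvTail1 t b l r p
  | 2, t, b, l, r, p => pvTail2 t b l r p
  | 3, t, b, l, r, p => pvTail3 t b l r p
  | _, _, _, _, _, _ => []

def pvPos : Nat → Int → Int → Int → Int → Int → Int × Int
  | 0, t, _, _, _, p => (t, p)
  | 1, _, _, _, r, p => (p, r)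
  | 2, _, b, _, _, p => (b, p)
  | 3, _, _, l, _, p => (p, l)
  | _, _, _, _, _, _ => (0, 0)

def pvWf (rows cols : Int) : Nat → Int → Int → Int → Int → Int → Prop
  | 0, t, b, l, r, p => 0 ≤ t ∧ t ≤ b ∧ b < rows ∧ 0 ≤ l ∧ l ≤ p ∧ p ≤ r ∧ r < cols
  | 1, t, b, l, r, p => 0 ≤ t ∧ t < p ∧ p ≤ b ∧ b < rows ∧ 0 ≤ l ∧ l ≤ r ∧ r < cols
  | 2, t, b, l, r, p => 0 ≤ t ∧ t < b ∧ b < rows ∧ 0 ≤ l ∧ l ≤ p ∧ p ≤ r - 1 ∧ r < cols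
  | 3, t, b, l, r, p => 0 ≤ t ∧ t + 1 ≤ p ∧ p ≤ b - 1 ∧ b < rows ∧ 0 ≤ l ∧ l < r ∧ r < cols
  | _, _, _, _, _, _ => False

theorem pv_fuel_nil {t b l r : Int} (fuel : Nat) (h : b < t ∨ r < l) :
    pvSpiralFuel fuel t b l r = [] := by
  cases fuel with
  | zero => rfl
  | succ fuel => simp only [pvSpiralFuel]; rw [if_neg (by omega)]

theorem pv_fuel_irrel : ∀ (f1 f2 : Nat) (t b l r : Int),
    (b - t + (r - l) + 2).toNat ≤ f1 → (b - t + (r - l) + 2).toNat ≤ f2 →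
    pvSpiralFuel f1 t b l r = pvSpiralFuel f2 t b l r := by
  intro f1
  induction f1 with
  | zero =>
    intro f2 t b l r h1 h2
    rw [pv_fuel_nil 0 (by omega), pv_fuel_nil f2 (by omega)]
  | succ f1 ih =>
    intro f2 t b l r h1 h2
    by_cases h : t ≤ b ∧ l ≤ r
    · cases f2 with
      | zero => omega
      | succ f2 =>
        simp only [pvSpiralFuel]
        rw [if_pos h, if_pos h, ih f2 (t + 1) (b - 1) (l + 1) (r - 1) (by omega) (by omega)]
    · rw [pv_fuel_nil _ (by omega), pv_fuel_nil _ (by omega)]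

theorem pv_spiralGo_unfold (t b l r : Int) :
    pvSpiralGo t b l r =
      if t ≤ b ∧ l ≤ r then
        ((PySem.List.pyRange l (r + 1) 1).map (fun c => (t, c)))
        ++ ((PySem.List.pyRange (t + 1) (b + 1) 1).map (fun x => (x, r)))
        ++ (if t < b then (PySem.List.pyRange (r - 1) (l - 1) (-1)).map (fun c => (b, c)) else [])
        ++ (if l < r then (PySem.List.pyRange (b - 1) t (-1)).map (fun x => (x, l)) else [])
        ++ pvSpiralGo (t + 1) (b - 1) (l + 1) (r - 1)
      else [] := by
  unfold pvSpiralGo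
  by_cases h : t ≤ b ∧ l ≤ r
  · rw [if_pos h]
    obtain ⟨m, hm⟩ : ∃ m, (b - t + (r - l) + 2).toNat = m + 1 :=
      ⟨(b - t + (r - l) + 1).toNat, by omega⟩
    rw [hm]
    simp only [pvSpiralFuel]
    rw [if_pos h,
        pv_fuel_irrel m ((b - 1 - (t + 1) + (r - 1 - (l + 1)) + 2).toNat)
          (t + 1) (b - 1) (l + 1) (r - 1) (by omega) (by omega)]
  · rw [if_neg h, pv_fuel_nil _ (by omega)]

theorem pv_spiralGo_nil {t b l r : Int} (h : b < t ∨ r < l) : pvSpiralGo t b l r = [] := by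
  unfold pvSpiralGo; exact pv_fuel_nil _ h

theorem pv_mem_fuel : ∀ (fuel : Nat) (t b l r i j : Int),
    (b - t + (r - l) + 2).toNat ≤ fuel →
    ((i, j) ∈ pvSpiralFuel fuel t b l r ↔ t ≤ i ∧ i ≤ b ∧ l ≤ j ∧ j ≤ r) := by
  intro fuel
  induction fuel with
  | zero =>
    intro t b l r i j h
    rw [pv_fuel_nil 0 (by omega)]
    simp
    omega
  | succ fuel ih =>
    intro t b l r i j h
    by_cases hreg : t ≤ b ∧ l ≤ r
    · simp only [pvSpiralFuel]
      rw [if_pos hreg]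
      by_cases htb : t < b <;> by_cases hlr : l < r <;>
        simp [htb, hlr, PySem.List.mem_pyRange_one, PySem.List.mem_pyRange_neg_one,
          ih (t + 1) (b - 1) (l + 1) (r - 1) i j (by omega), Prod.ext_iff] <;> omega
    · rw [pv_fuel_nil _ (by omega)]
      simp
      omega

theorem pv_mem_spiralGo (t b l r i j : Int) :
    (i, j) ∈ pvSpiralGo t b l r ↔ t ≤ i ∧ i ≤ b ∧ l ≤ j ∧ j ≤ r :=
  pv_mem_fuel _ t b l r i j (Nat.le_refl _)

theorem pv_length_fuel : ∀ (fuel : Nat) (t b l r : Int),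
    (b - t + (r - l) + 2).toNat ≤ fuel →
    t ≤ b → l ≤ r → (pvSpiralFuel fuel t b l r).length = ((b - t + 1) * (r - l + 1)).toNat := by
  intro fuel
  induction fuel with
  | zero => intro t b l r h ht hl; omega
  | succ fuel ih =>
    intro t b l r h ht hl
    simp only [pvSpiralFuel]
    rw [if_pos ⟨ht, hl⟩]
    obtain ⟨B, hB⟩ : ∃ B : ℕ, b - t = (B : ℤ) := ⟨(b - t).toNat, by omega⟩
    obtain ⟨R, hR⟩ : ∃ R : ℕ, r - l = (R : ℤ) := ⟨(r - l).toNat, by omega⟩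
    have eR : ((b - t + 1) * (r - l + 1)).toNat = (B + 1) * (R + 1) := by
      rw [show b - t + 1 = ((B + 1 : ℕ) : ℤ) by omega,
          show r - l + 1 = ((R + 1 : ℕ) : ℤ) by omega, ← Nat.cast_mul, Int.toNat_natCast]
    by_cases htb : t < b <;> by_cases hlr : l < r <;>
      (by_cases hin : t + 1 ≤ b - 1 ∧ l + 1 ≤ r - 1
       · first
         | exact absurd hin (by omega)
         | (have eI : ((b - 1 - (t + 1) + 1) * (r - 1 - (l + 1) + 1)).toNat = (B - 1) * (R - 1) := by
              rw [show b - 1 - (t + 1) + 1 = ((B - 1 : ℕ) : ℤ) by omega,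
                  show r - 1 - (l + 1) + 1 = ((R - 1 : ℕ) : ℤ) by omega, ← Nat.cast_mul,
                  Int.toNat_natCast]
            simp only [htb, hlr, if_true, if_false, List.length_append, List.length_map,
              PySem.List.length_pyRange_one, PySem.List.length_pyRange_neg_one,
              ih (t + 1) (b - 1) (l + 1) (r - 1) (by omega) hin.1 hin.2, eI, eR]
            obtain ⟨B2, rfl⟩ : ∃ B2 : ℕ, B = B2 + 2 := ⟨B - 2, by omega⟩
            obtain ⟨R2, rfl⟩ : ∃ R2 : ℕ, R = R2 + 2 := ⟨R - 2, by omega⟩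
            rw [show (r + 1 - l).toNat = R2 + 3 by omega,
                show (b + 1 - (t + 1)).toNat = B2 + 2 by omega,
                show (r - 1 - (l - 1)).toNat = R2 + 2 by omega,
                show (b - 1 - t).toNat = B2 + 1 by omega,
                show (B2 + 2 - 1 : ℕ) = B2 + 1 by omega,
                show (R2 + 2 - 1 : ℕ) = R2 + 1 by omega]
            ring)
       · simp only [htb, hlr, if_true, if_false, List.length_append, List.length_map,
           PySem.List.length_pyRange_one, PySem.List.length_pyRange_neg_one, eR,
           pv_fuel_nil fuel (show b - 1 < t + 1 ∨ r - 1 < l + 1 by omega), List.length_nil]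
         rcases (show B = 0 ∨ B = 1 ∨ R = 0 ∨ R = 1 by omega) with rfl | rfl | rfl | rfl <;>
           simp <;> omega)

theorem pv_length_spiralGo (t b l r : Int) (ht : t ≤ b) (hl : l ≤ r) :
    (pvSpiralGo t b l r).length = ((b - t + 1) * (r - l + 1)).toNat :=
  pv_length_fuel _ t b l r (Nat.le_refl _) ht hl

theorem pv_spiralGo_eq_tail0 {t b l r : Int} (ht : t ≤ b) (hl : l ≤ r) :
    pvSpiralGo t b l r = pvTail0 t b l r l := by
  rw [pv_spiralGo_unfold, if_pos ⟨ht, hl⟩]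
  unfold pvTail0 pvTail1 pvTail2 pvTail3
  by_cases htb : t < b <;> by_cases hlr : l < r <;>
    simp [htb, hlr, List.append_assoc, PySem.List.pyRange_neg_one_eq_nil (by omega : (t:Int) - 1 ≤ t)]
theorem pv_tail0_cons {t b l r q : Int} (h : q ≤ r) :
    pvTail0 t b l r q = (t, q) :: pvTail0 t b l r (q + 1) := by
  unfold pvTail0
  rw [PySem.List.pyRange_one_cons (by omega : q < r + 1)]
  simp

theorem pv_tail0_expand (t b l r : Int) : pvTail0 t b l r (r + 1) = pvTail1 t b l r (t + 1) := by
  unfold pvTail0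
  rw [PySem.List.pyRange_one_eq_nil (by omega)]
  simp

theorem pv_tail1_cons {t b l r q : Int} (h : q ≤ b) :
    pvTail1 t b l r q = (q, r) :: pvTail1 t b l r (q + 1) := by
  unfold pvTail1
  rw [PySem.List.pyRange_one_cons (by omega : q < b + 1)]
  simp

theorem pv_tail1_expand (t b l r : Int) : pvTail1 t b l r (b + 1) = pvTail2 t b l r (r - 1) := by
  unfold pvTail1
  rw [PySem.List.pyRange_one_eq_nil (by omega)]
  simp

theorem pv_tail2_cons {t b l r q : Int} (ht : t < b) (h : l ≤ q) :
    pvTail2 t b l r q = (b, q) :: pvTail2 t b l r (q - 1) := by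
  unfold pvTail2
  rw [if_pos ht, PySem.List.pyRange_neg_one_cons (by omega : l - 1 < q), if_pos ht]
  simp

theorem pv_tail2_expand (t b l r : Int) : pvTail2 t b l r (l - 1) = pvTail3 t b l r (b - 1) := by
  unfold pvTail2
  rw [PySem.List.pyRange_neg_one_eq_nil (by omega)]
  simp

theorem pv_tail3_cons {t b l r q : Int} (hl : l < r) (h : t < q) :
    pvTail3 t b l r q = (q, l) :: pvTail3 t b l r (q - 1) := by
  unfold pvTail3
  rw [if_pos hl, PySem.List.pyRange_neg_one_cons (by omega : t < q), if_pos hl]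
  simp

theorem pv_tail3_expand (t b l r : Int) : pvTail3 t b l r t = pvSpiralGo (t + 1) (b - 1) (l + 1) (r - 1) := by
  unfold pvTail3
  rw [PySem.List.pyRange_neg_one_eq_nil (by omega)]
  simp

theorem pv_mem_tail3 {t b l r : Int} (q : Int) (ht : t < b) (hl : l < r) (i j : Int) :
    (i, j) ∈ pvTail3 t b l r q ↔ (j = l ∧ t + 1 ≤ i ∧ i ≤ q) ∨ (t + 1 ≤ i ∧ i ≤ b - 1 ∧ l + 1 ≤ j ∧ j ≤ r - 1) := by
  unfold pvTail3
  simp only [if_pos hl, List.mem_append, List.mem_map, PySem.List.mem_pyRange_neg_one,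
    Prod.mk.injEq, pv_mem_spiralGo]
  constructor
  · rintro (⟨x, hx, rfl, rfl⟩ | h') <;> omega
  · rintro (⟨rfl, h1, h2⟩ | h')
    · exact Or.inl ⟨i, by omega, rfl, rfl⟩
    · right; omega

theorem pv_mem_tail2 {t b l r : Int} (q : Int) (ht : t < b) (hl : l < r) (i j : Int) :
    (i, j) ∈ pvTail2 t b l r q ↔ (i = b ∧ l ≤ j ∧ j ≤ q) ∨ (t + 1 ≤ i ∧ i ≤ b - 1 ∧ l ≤ j ∧ j ≤ r - 1) := by
  unfold pvTail2 pvTail3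
  simp [ht, hl, PySem.List.mem_pyRange_neg_one, pv_mem_spiralGo, Prod.ext_iff]
  omega

theorem pv_mem_tail1 {t b l r : Int} (q : Int) (ht : t ≤ b) (hl : l ≤ r) (i j : Int) :
    (i, j) ∈ pvTail1 t b l r q ↔ (j = r ∧ q ≤ i ∧ i ≤ b) ∨ (t + 1 ≤ i ∧ i ≤ b ∧ l ≤ j ∧ j ≤ r - 1) := by
  unfold pvTail1 pvTail2 pvTail3
  by_cases htb : t < b <;> by_cases hlr : l < r <;>
    simp [htb, hlr, PySem.List.mem_pyRange_one, PySem.List.mem_pyRange_neg_one,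
      pv_mem_spiralGo, Prod.ext_iff, PySem.List.pyRange_neg_one_eq_nil (by omega : (t:Int) - 1 ≤ t)] <;>
    omega

theorem pv_mem_tail0 {t b l r : Int} (q : Int) (ht : t ≤ b) (hl : l ≤ r) (i j : Int) :
    (i, j) ∈ pvTail0 t b l r q ↔ (i = t ∧ q ≤ j ∧ j ≤ r) ∨ (t + 1 ≤ i ∧ i ≤ b ∧ l ≤ j ∧ j ≤ r) := by
  unfold pvTail0 pvTail1 pvTail2 pvTail3
  by_cases htb : t < b <;> by_cases hlr : l < r <;>
    simp [htb, hlr, PySem.List.mem_pyRange_one, PySem.List.mem_pyRange_neg_one,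
      pv_mem_spiralGo, Prod.ext_iff, PySem.List.pyRange_neg_one_eq_nil (by omega : (t:Int) - 1 ≤ t)] <;>
    omega

-- ---- nested-grid get/set lemmas ----
theorem pv_length_pvSet2 {α : Type} (g : List (List α)) (i j : Int) (v : α) :
    (pvSet2 g i j v).length = g.length := by
  simp [pvSet2, PySem.List.length_pySetD]


theorem pv_rowlen_pvSet2 {α : Type} (g : List (List α)) (C : Nat)
    (hrow : ∀ row ∈ g, row.length = C) (i j : Int) (hi : 0 ≤ i) (v : α) :
    ∀ row ∈ pvSet2 g i j v, row.length = C := by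
  intro row hmem
  unfold pvSet2 at hmem
  by_cases h2 : i < (g.length : Int)
  · rw [PySem.List.pySetD_of_nonneg g _ hi] at hmem
    rcases List.mem_or_eq_of_mem_set hmem with h | rfl
    · exact hrow _ h
    · rw [PySem.List.length_pySetD]
      exact hrow _ (PySem.List.pyGetD_mem g [] (by unfold PySem.Raise.InRange; omega))
  · have heq : PySem.List.pySetD g i (PySem.List.pySetD (PySem.List.pyGetD g i []) j v) = g := by
      unfold PySem.List.pySetD
      rw [(PySem.List.pySet?_eq_none_iff _ _ _).mpr (by unfold PySem.Raise.InRange; omega)]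
      rfl
    rw [heq] at hmem
    exact hrow _ hmem


theorem pv_pvGet2_pvSet2 {α : Type} (g : List (List α)) (R C : Nat)
    (hg : g.length = R) (hrow : ∀ row ∈ g, row.length = C)
    {i j i' j' : Int} (hi : 0 ≤ i) (hi2 : i < (R : Int)) (hj : 0 ≤ j) (hj2 : j < (C : Int))
    (hi' : 0 ≤ i') (hi2' : i' < (R : Int)) (hj' : 0 ≤ j') (hj2' : j' < (C : Int)) (v : α) (d : α) :
    pvGet2 (pvSet2 g i j v) i' j' d = if i' = i ∧ j' = j then v else pvGet2 g i' j' d := by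
  have hrowi : (PySem.List.pyGetD g i []).length = C :=
    hrow _ (PySem.List.pyGetD_mem g [] (by unfold PySem.Raise.InRange; omega))
  unfold pvGet2 pvSet2
  rw [PySem.List.pySetD_of_nonneg g _ hi,
      PySem.List.pyGetD_eq_getElem _ [] hi' (by simp only [List.length_set]; omega),
      List.getElem_set]
  by_cases hii : i' = i
  · subst hii
    rw [if_pos (by omega)]
    rw [PySem.List.pySetD_of_nonneg _ _ hj,
        PySem.List.pyGetD_eq_getElem _ d hj' (by simp only [List.length_set, hrowi]; omega),
        List.getElem_set]
    by_cases hjj : j' = j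
    · subst hjj; rw [if_pos (by omega), if_pos ⟨rfl, rfl⟩]
    · rw [if_neg (by omega), if_neg (by simp [hjj])]
      exact (PySem.List.pyGetD_eq_getElem _ d hj' (by rw [hrowi]; omega)).symm
  · rw [if_neg (by omega), if_neg (by simp [hii])]
    rw [PySem.List.pyGetD_eq_getElem _ [] hi' (by omega)]


theorem pv_pvGet2_const {α : Type} (R C : Nat) (x : α) {i j : Int}
    (hi : 0 ≤ i) (hi2 : i < (R : Int)) (hj : 0 ≤ j) (hj2 : j < (C : Int)) (d : α) :
    pvGet2 (List.replicate R (List.replicate C x)) i j d = x := by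
  unfold pvGet2
  rw [PySem.List.pyGetD_eq_getElem _ [] hi (by simp; omega), List.getElem_replicate,
      PySem.List.pyGetD_eq_getElem _ d hj (by simp; omega), List.getElem_replicate]

-- direction-table and mod computations used by the walk
theorem pv_dir0 : PySem.List.pyGetD pvDirs 0 (0, 0) = (0, 1) := by decide
theorem pv_dir1 : PySem.List.pyGetD pvDirs 1 (0, 0) = (1, 0) := by decide
theorem pv_dir2 : PySem.List.pyGetD pvDirs 2 (0, 0) = (0, -1) := by decide
theorem pv_dir3 : PySem.List.pyGetD pvDirs 3 (0, 0) = (-1, 0) := by decide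
theorem pv_mod1 : PySem.Int.mod (0 + 1) 4 = 1 := by decide
theorem pv_mod2 : PySem.Int.mod (1 + 1) 4 = 2 := by decide
theorem pv_mod3 : PySem.Int.mod (2 + 1) 4 = 3 := by decide
theorem pv_mod0 : PySem.Int.mod (3 + 1) 4 = 0 := by decide

-- visited-characterisation is preserved by marking the head of the suffix
theorem pv_char_step (rows cols : Int) (hr : 0 ≤ rows) (hc : 0 ≤ cols)
    (visited : List (List Bool)) (hvl : visited.length = rows.toNat)
    (hvr : ∀ row ∈ visited, row.length = cols.toNat)
    (pos : Int × Int) (S' : List (Int × Int))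
    (hp1 : 0 ≤ pos.1) (hp2 : pos.1 < rows) (hp3 : 0 ≤ pos.2) (hp4 : pos.2 < cols)
    (hchar : ∀ i j : Int, 0 ≤ i → i < rows → 0 ≤ j → j < cols →
      (pvGet2 visited i j false = true ↔ (i, j) ∉ pos :: S'))
    (hnot : pos ∉ S') :
    ∀ i j : Int, 0 ≤ i → i < rows → 0 ≤ j → j < cols →
      (pvGet2 (pvSet2 visited pos.1 pos.2 true) i j false = true ↔ (i, j) ∉ S') := by
  intro i j h1 h2 h3 h4
  rw [pv_pvGet2_pvSet2 visited rows.toNat cols.toNat hvl hvr hp1 (by omega) hp3 (by omega)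
      h1 (by omega) h3 (by omega) true false]
  by_cases h : i = pos.1 ∧ j = pos.2
  · rw [if_pos h]
    have he : (i, j) = pos := by rw [h.1, h.2]
    simp [he, hnot]
  · rw [if_neg h, hchar i j h1 h2 h3 h4, List.mem_cons]
    have hne : (i, j) ≠ pos := by
      intro he; exact h ⟨congrArg Prod.fst he, congrArg Prod.snd he⟩
    simp [hne]

theorem pvLoopA_single (rows cols : Int) (ch : Char) (grid : List (List (Option Char)))
    (visited : List (List Bool)) (row col dirIdx : Int) :
    pvLoopA rows cols [ch] grid visited row col dirIdx = pvSet2 grid row col (some ch) := rfl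

theorem pvLoopA_cons_cons (rows cols : Int) (ch ch2 : Char) (rest2 : List Char)
    (grid : List (List (Option Char))) (visited : List (List Bool)) (row col dirIdx : Int) :
    pvLoopA rows cols (ch :: ch2 :: rest2) grid visited row col dirIdx =
      (let grid' := pvSet2 grid row col (some ch)
       let visited' := pvSet2 visited row col true
       let d := PySem.List.pyGetD pvDirs dirIdx (0, 0)
       let nr := row + d.1
       let nc := col + d.2
       if nr < 0 ∨ nr ≥ rows ∨ nc < 0 ∨ nc ≥ cols ∨ pvGet2 visited' nr nc false = true then
         let dirIdx' := PySem.Int.mod (dirIdx + 1) 4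
         let d' := PySem.List.pyGetD pvDirs dirIdx' (0, 0)
         pvLoopA rows cols (ch2 :: rest2) grid' visited' (row + d'.1) (col + d'.2) dirIdx'
       else
         pvLoopA rows cols (ch2 :: rest2) grid' visited' nr nc dirIdx) := rfl

theorem pv_loopA_eq_assign (rows cols : Int) :
    ∀ (cs : List Char) (phase : Nat) (t b l r p : Int)
      (grid : List (List (Option Char))) (visited : List (List Bool)),
      pvWf rows cols phase t b l r p →
      visited.length = rows.toNat → (∀ row ∈ visited, row.length = cols.toNat) →
      (∀ i j : Int, 0 ≤ i → i < rows → 0 ≤ j → j < cols →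
        (pvGet2 visited i j false = true ↔ (i, j) ∉ pvSfx phase t b l r p)) →
      cs.length ≤ (pvSfx phase t b l r p).length →
      pvLoopA rows cols cs grid visited (pvPos phase t b l r p).1 (pvPos phase t b l r p).2 (phase : Int)
        = ((pvSfx phase t b l r p).zip cs).foldl (fun g q => pvSet2 g q.1.1 q.1.2 (some q.2)) grid := by
  intro cs
  induction cs with
  | nil =>
    intro phase t b l r p grid visited hwf hvl hvr hchar hlen
    simp [pvLoopA]
  | cons ch rest ih =>
    intro phase t b l r p grid visited hwf hvl hvr hchar hlen
    match phase, hwf with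
    | 0, hwf =>
      obtain ⟨hw0, hw1, hw2, hw3, hw4, hw5, hw6⟩ := hwf
      simp only [pvSfx, pvPos] at hchar hlen ⊢
      rw [pv_tail0_cons hw5] at hchar hlen ⊢
      cases rest with
      | nil => rw [pvLoopA_single]; simp
      | cons ch2 rest2 =>
        rw [pvLoopA_cons_cons]
        simp only [Nat.cast_zero, pv_dir0, add_zero]
        have hcs := pv_char_step rows cols (by omega) (by omega) visited hvl hvr (t, p)
          (pvTail0 t b l r (p + 1)) (by omega) (by omega) (by omega) (by omega) hchar
          (by rw [pv_mem_tail0 _ (by omega) (by omega)]; omega)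
        rw [List.zip_cons_cons, List.foldl_cons]
        by_cases hpr : p < r
        · -- mid top row: step right
          have hvfalse : pvGet2 (pvSet2 visited t p true) t (p + 1) false = false := by
            have hiff := hcs t (p + 1) (by omega) (by omega) (by omega) (by omega)
            have hmem : ((t : Int), p + 1) ∈ pvTail0 t b l r (p + 1) := by
              rw [pv_mem_tail0 _ (by omega) (by omega)]; omega
            cases hb : pvGet2 (pvSet2 visited t p true) t (p + 1) false
            · rfl
            · exact absurd hmem (hiff.mp hb)
          rw [if_neg (by
            rintro (h | h | h | h | h) <;>
              first
              | omega
              | (rw [hvfalse] at h; exact Bool.false_ne_true h))]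
          have := ih 0 t b l r (p + 1) (pvSet2 grid t p (some ch)) (pvSet2 visited t p true)
            (by simp only [pvWf]; omega)
            (by rw [pv_length_pvSet2, hvl])
            (pv_rowlen_pvSet2 visited cols.toNat hvr t p (by omega) true)
            (by simpa only [pvSfx] using hcs)
            (by simp only [pvSfx, List.length_cons]
                simp only [List.length_cons] at hlen; omega)
          simpa only [pvSfx, pvPos, Nat.cast_zero] using this
        · -- end of top row: turn down
          have hpr' : p = r := by omega
          rw [hpr'] at hcs hlen ⊢
          rw [pv_tail0_expand] at hcs hlen ⊢
          have htb : t < b := by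
            by_contra htb
            have hnil : pvTail1 t b l r (t + 1) = [] := by
              rw [show t + 1 = b + 1 by omega, pv_tail1_expand]
              unfold pvTail2 pvTail3
              rw [pv_spiralGo_nil (by omega), if_neg (by omega)]
              simp [PySem.List.pyRange_neg_one_eq_nil (by omega : (b : Int) - 1 ≤ t)]
            rw [hnil] at hlen
            simp at hlen
          have hguard : t < 0 ∨ t ≥ rows ∨ r + 1 < 0 ∨ r + 1 ≥ cols ∨
              pvGet2 (pvSet2 visited t r true) t (r + 1) false = true := by
            by_cases hcol : r + 1 ≥ cols
            · right; right; right; left; exact hcol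
            · right; right; right; right
              have hiff := hcs t (r + 1) (by omega) (by omega) (by omega) (by omega)
              rw [hiff]
              rw [pv_mem_tail1 _ (by omega) (by omega)]
              omega
          rw [if_pos hguard, pv_mod1, pv_dir1]
          simp only [add_zero]
          have := ih 1 t b l r (t + 1) (pvSet2 grid t r (some ch)) (pvSet2 visited t r true)
            (by simp only [pvWf]; omega)
            (by rw [pv_length_pvSet2, hvl])
            (pv_rowlen_pvSet2 visited cols.toNat hvr t r (by omega) true)
            (by simpa only [pvSfx] using hcs)
            (by simp only [pvSfx, List.length_cons]
                simp only [List.length_cons] at hlen; omega)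
          simpa only [pvSfx, pvPos, Nat.cast_one, add_zero] using this
    | 1, hwf =>
      obtain ⟨hw0, hw1, hw2, hw3, hw4, hw5, hw6⟩ := hwf
      simp only [pvSfx, pvPos] at hchar hlen ⊢
      rw [pv_tail1_cons hw2] at hchar hlen ⊢
      cases rest with
      | nil => rw [pvLoopA_single]; simp
      | cons ch2 rest2 =>
        rw [pvLoopA_cons_cons]
        simp only [Nat.cast_one, pv_dir1, add_zero, ← sub_eq_add_neg]
        have hcs := pv_char_step rows cols (by omega) (by omega) visited hvl hvr (p, r)
          (pvTail1 t b l r (p + 1)) (by omega) (by omega) (by omega) (by omega) hchar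
          (by rw [pv_mem_tail1 _ (by omega) (by omega)]; omega)
        rw [List.zip_cons_cons, List.foldl_cons]
        by_cases hpb : p < b
        · -- mid right column: step down
          have hvfalse : pvGet2 (pvSet2 visited p r true) (p + 1) r false = false := by
            have hiff := hcs (p + 1) r (by omega) (by omega) (by omega) (by omega)
            have hmem : ((p : Int) + 1, r) ∈ pvTail1 t b l r (p + 1) := by
              rw [pv_mem_tail1 _ (by omega) (by omega)]; omega
            cases hb : pvGet2 (pvSet2 visited p r true) (p + 1) r false
            · rfl
            · exact absurd hmem (hiff.mp hb)
          rw [if_neg (by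
            rintro (h | h | h | h | h) <;>
              first
              | omega
              | (rw [hvfalse] at h; exact Bool.false_ne_true h))]
          have := ih 1 t b l r (p + 1) (pvSet2 grid p r (some ch)) (pvSet2 visited p r true)
            (by simp only [pvWf]; omega)
            (by rw [pv_length_pvSet2, hvl])
            (pv_rowlen_pvSet2 visited cols.toNat hvr p r (by omega) true)
            (by simpa only [pvSfx] using hcs)
            (by simp only [pvSfx, List.length_cons]
                simp only [List.length_cons] at hlen; omega)
          simpa only [pvSfx, pvPos, Nat.cast_one] using this
        · -- bottom-right corner: turn left
          have hpb' : p = b := by omega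
          rw [hpb'] at hcs hlen ⊢
          rw [pv_tail1_expand] at hcs hlen ⊢
          have hlr : l < r := by
            by_contra hlr
            have hnil : pvTail2 t b l r (r - 1) = [] := by
              unfold pvTail2 pvTail3
              rw [pv_spiralGo_nil (by omega)]
              simp [hlr, PySem.List.pyRange_neg_one_eq_nil (by omega : (r : Int) - 1 ≤ l - 1)]
            rw [hnil] at hlen
            simp at hlen
          have hguard : b + 1 < 0 ∨ b + 1 ≥ rows ∨ r < 0 ∨ r ≥ cols ∨
              pvGet2 (pvSet2 visited b r true) (b + 1) r false = true := by
            by_cases hrow2 : b + 1 ≥ rows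
            · right; left; exact hrow2
            · right; right; right; right
              have hiff := hcs (b + 1) r (by omega) (by omega) (by omega) (by omega)
              rw [hiff]
              rw [pv_mem_tail2 _ (by omega) (by omega)]
              omega
          rw [if_pos hguard, pv_mod2, pv_dir2]
          simp only [add_zero, ← sub_eq_add_neg]
          have := ih 2 t b l r (r - 1) (pvSet2 grid b r (some ch)) (pvSet2 visited b r true)
            (by simp only [pvWf]; omega)
            (by rw [pv_length_pvSet2, hvl])
            (pv_rowlen_pvSet2 visited cols.toNat hvr b r (by omega) true)
            (by simpa only [pvSfx] using hcs)
            (by simp only [pvSfx, List.length_cons]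
                simp only [List.length_cons] at hlen; omega)
          simpa only [pvSfx, pvPos, Nat.cast_ofNat] using this
    | 2, hwf =>
      obtain ⟨hw0, hw1, hw2, hw3, hw4, hw5, hw6⟩ := hwf
      simp only [pvSfx, pvPos] at hchar hlen ⊢
      rw [pv_tail2_cons hw1 hw4] at hchar hlen ⊢
      cases rest with
      | nil => rw [pvLoopA_single]; simp
      | cons ch2 rest2 =>
        rw [pvLoopA_cons_cons]
        simp only [Nat.cast_ofNat, pv_dir2, add_zero, ← sub_eq_add_neg]
        have hcs := pv_char_step rows cols (by omega) (by omega) visited hvl hvr (b, p)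
          (pvTail2 t b l r (p - 1)) (by omega) (by omega) (by omega) (by omega) hchar
          (by rw [pv_mem_tail2 _ (by omega) (by omega)]; omega)
        rw [List.zip_cons_cons, List.foldl_cons]
        by_cases hpl : l < p
        · -- mid bottom row: step left
          have hvfalse : pvGet2 (pvSet2 visited b p true) b (p - 1) false = false := by
            have hiff := hcs b (p - 1) (by omega) (by omega) (by omega) (by omega)
            have hmem : ((b : Int), p - 1) ∈ pvTail2 t b l r (p - 1) := by
              rw [pv_mem_tail2 _ (by omega) (by omega)]; omega
            cases hb : pvGet2 (pvSet2 visited b p true) b (p - 1) false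
            · rfl
            · exact absurd hmem (hiff.mp hb)
          rw [if_neg (by
            rintro (h | h | h | h | h) <;>
              first
              | omega
              | (rw [hvfalse] at h; exact Bool.false_ne_true h))]
          have := ih 2 t b l r (p - 1) (pvSet2 grid b p (some ch)) (pvSet2 visited b p true)
            (by simp only [pvWf]; omega)
            (by rw [pv_length_pvSet2, hvl])
            (pv_rowlen_pvSet2 visited cols.toNat hvr b p (by omega) true)
            (by simpa only [pvSfx] using hcs)
            (by simp only [pvSfx, List.length_cons]
                simp only [List.length_cons] at hlen; omega)
          simpa only [pvSfx, pvPos, Nat.cast_ofNat] using this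
        · -- bottom-left corner: turn up
          have hpl' : p = l := by omega
          rw [hpl'] at hcs hlen ⊢
          rw [pv_tail2_expand] at hcs hlen ⊢
          have htb1 : t < b - 1 := by
            by_contra htb1
            have hnil : pvTail3 t b l r (b - 1) = [] := by
              unfold pvTail3
              rw [pv_spiralGo_nil (by omega)]
              simp [PySem.List.pyRange_neg_one_eq_nil (by omega : (b : Int) - 1 ≤ t)]
            rw [hnil] at hlen
            simp at hlen
          have hguard : b < 0 ∨ b ≥ rows ∨ l - 1 < 0 ∨ l - 1 ≥ cols ∨
              pvGet2 (pvSet2 visited b l true) b (l - 1) false = true := by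
            by_cases hneg : l - 1 < 0
            · right; right; left; exact hneg
            · right; right; right; right
              have hiff := hcs b (l - 1) (by omega) (by omega) (by omega) (by omega)
              rw [hiff]
              rw [pv_mem_tail3 _ (by omega) (by omega)]
              omega
          rw [if_pos hguard, pv_mod3, pv_dir3]
          simp only [add_zero, ← sub_eq_add_neg]
          have := ih 3 t b l r (b - 1) (pvSet2 grid b l (some ch)) (pvSet2 visited b l true)
            (by simp only [pvWf]; omega)
            (by rw [pv_length_pvSet2, hvl])
            (pv_rowlen_pvSet2 visited cols.toNat hvr b l (by omega) true)
            (by simpa only [pvSfx] using hcs)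
            (by simp only [pvSfx, List.length_cons]
                simp only [List.length_cons] at hlen; omega)
          simpa only [pvSfx, pvPos, Nat.cast_ofNat] using this
    | 3, hwf =>
      obtain ⟨hw0, hw1, hw2, hw3, hw4, hw5, hw6⟩ := hwf
      simp only [pvSfx, pvPos] at hchar hlen ⊢
      rw [pv_tail3_cons hw5 (by omega)] at hchar hlen ⊢
      cases rest with
      | nil => rw [pvLoopA_single]; simp
      | cons ch2 rest2 =>
        rw [pvLoopA_cons_cons]
        simp only [Nat.cast_ofNat, pv_dir3, add_zero, ← sub_eq_add_neg]
        have hcs := pv_char_step rows cols (by omega) (by omega) visited hvl hvr (p, l)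
          (pvTail3 t b l r (p - 1)) (by omega) (by omega) (by omega) (by omega) hchar
          (by rw [pv_mem_tail3 _ (by omega) (by omega)]; omega)
        rw [List.zip_cons_cons, List.foldl_cons]
        by_cases hpt : t + 1 < p
        · -- mid left column: step up
          have hvfalse : pvGet2 (pvSet2 visited p l true) (p - 1) l false = false := by
            have hiff := hcs (p - 1) l (by omega) (by omega) (by omega) (by omega)
            have hmem : ((p : Int) - 1, l) ∈ pvTail3 t b l r (p - 1) := by
              rw [pv_mem_tail3 _ (by omega) (by omega)]; omega
            cases hb : pvGet2 (pvSet2 visited p l true) (p - 1) l false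
            · rfl
            · exact absurd hmem (hiff.mp hb)
          rw [if_neg (by
            rintro (h | h | h | h | h) <;>
              first
              | omega
              | (rw [hvfalse] at h; exact Bool.false_ne_true h))]
          have := ih 3 t b l r (p - 1) (pvSet2 grid p l (some ch)) (pvSet2 visited p l true)
            (by simp only [pvWf]; omega)
            (by rw [pv_length_pvSet2, hvl])
            (pv_rowlen_pvSet2 visited cols.toNat hvr p l (by omega) true)
            (by simpa only [pvSfx] using hcs)
            (by simp only [pvSfx, List.length_cons]
                simp only [List.length_cons] at hlen; omega)
          simpa only [pvSfx, pvPos, Nat.cast_ofNat] using this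
        · -- top-left corner of the layer: turn right into the inner layer
          have hpt' : p = t + 1 := by omega
          rw [hpt'] at hcs hlen ⊢
          rw [show t + 1 - 1 = t by omega, pv_tail3_expand] at hcs hlen ⊢
          have hinner : l + 1 ≤ r - 1 := by
            by_contra hinner
            rw [pv_spiralGo_nil (by omega)] at hlen
            simp at hlen
          rw [pv_spiralGo_eq_tail0 (by omega) (by omega)] at hcs hlen ⊢
          have hguard : t < 0 ∨ t ≥ rows ∨ l < 0 ∨ l ≥ cols ∨
              pvGet2 (pvSet2 visited (t + 1) l true) t l false = true := by
            right; right; right; right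
            have hiff := hcs t l (by omega) (by omega) (by omega) (by omega)
            rw [hiff]
            rw [pv_mem_tail0 _ (by omega) (by omega)]
            omega
          rw [if_pos hguard, pv_mod0, pv_dir0]
          simp only [add_zero]
          have := ih 0 (t + 1) (b - 1) (l + 1) (r - 1) (l + 1)
            (pvSet2 grid (t + 1) l (some ch)) (pvSet2 visited (t + 1) l true)
            (by simp only [pvWf]; omega)
            (by rw [pv_length_pvSet2, hvl])
            (pv_rowlen_pvSet2 visited cols.toNat hvr (t + 1) l (by omega) true)
            (by simpa only [pvSfx] using hcs)
            (by simp only [pvSfx, List.length_cons]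
                simp only [List.length_cons] at hlen; omega)
          simpa only [pvSfx, pvPos, Nat.cast_zero] using this
    | (n + 4), hwf => exact absurd hwf (by simp [pvWf])


-- ---- reading the grid ----
theorem pv_rowRead (row : List (Option Char)) (acc : List Char) :
    row.foldl (fun acc cell => match cell with | some c => acc ++ [c] | none => acc) acc
      = acc ++ row.filterMap id := by
  induction row generalizing acc with
  | nil => simp
  | cons hd tl ih => cases hd <;> simp [ih, List.filterMap_cons, List.append_assoc]


theorem pv_readA_eq_readB (rows cols : Int) (hr : 1 ≤ rows) (hc : 1 ≤ cols)
    (g : List (List (Option Char))) (hg : g.length = rows.toNat)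
    (hrow : ∀ row ∈ g, row.length = cols.toNat) :
    (PySem.List.pyRange 0 rows 1).foldl (fun acc i =>
      (PySem.List.pyRange 0 cols 1).foldl (fun acc j =>
        match pvGet2 g i j none with
        | some c => acc ++ [c]
        | none => acc) acc) []
    = g.foldl (fun acc row => acc ++ row.filterMap id) [] := by
  unfold pvGet2
  rw [show rows = ((g.length : Nat) : Int) by omega]
  rw [PySem.List.foldl_pyRange_zero_pyGetD' g []
    (fun acc row => (PySem.List.pyRange 0 cols 1).foldl (fun acc j =>
      match PySem.List.pyGetD row j none with
      | some c => acc ++ [c]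
      | none => acc) acc) []]
  refine PySem.List.foldl_congr_mem g _ _ [] ?_
  intro acc row hmem
  have hcl : cols = ((row.length : Nat) : Int) := by have := hrow row hmem; omega
  rw [hcl, PySem.List.foldl_pyRange_zero_pyGetD' row none
    (fun acc cell => match cell with | some c => acc ++ [c] | none => acc) acc]
  exact pv_rowRead row acc


-- ---- assembly helpers ----
theorem pv_pad_eq (cs0 : List Char) (n : Int) (hn : 0 ≤ n) :
    (if (cs0.length : Int) < n then cs0 ++ List.replicate (n - cs0.length).toNat 'X'
     else if (cs0.length : Int) > n then PySem.List.slice cs0 none (some n) else cs0)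
    = PySem.List.slice cs0 none (some n)
      ++ List.replicate (n - (PySem.List.slice cs0 none (some n)).length).toNat 'X' := by
  rw [PySem.List.slice_to cs0 hn]
  by_cases h1 : (cs0.length : Int) < n
  · rw [if_pos h1, List.take_of_length_le (by omega)]
  · rw [if_neg h1]
    by_cases h2 : (cs0.length : Int) > n
    · rw [if_pos h2]
      have h3 : (n - (((cs0.take n.toNat).length : Nat) : Int)).toNat = 0 := by
        simp only [List.length_take]; omega
      rw [h3]
      simp
    · rw [if_neg h2]
      have h3 : (n - (((cs0.take n.toNat).length : Nat) : Int)).toNat = 0 := by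
        simp only [List.length_take]; omega
      rw [h3, List.take_of_length_le (by omega)]
      simp

theorem pv_pad_len (cs0 : List Char) (n : Int) (hn : 0 ≤ n) :
    (PySem.List.slice cs0 none (some n)
      ++ List.replicate (n - (PySem.List.slice cs0 none (some n)).length).toNat 'X').length
      = n.toNat := by
  rw [PySem.List.slice_to cs0 hn]
  simp only [List.length_append, List.length_replicate, List.length_take]
  omega

theorem pv_init_eq1 {α : Type} (R : Int) (x : α) :
    (PySem.List.pyRange 0 R 1).map (fun _ => x) = List.replicate R.toNat x := by
  rw [List.map_const', PySem.List.length_pyRange_one]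
  norm_num

theorem pv_init_eq2 {α : Type} (R C : Int) (x : α) :
    (PySem.List.pyRange 0 R 1).map (fun _ => (PySem.List.pyRange 0 C 1).map (fun _ => x))
      = List.replicate R.toNat (List.replicate C.toNat x) := by
  rw [pv_init_eq1, pv_init_eq1]

theorem pv_assign_length (ps : List ((Int × Int) × Char)) :
    ∀ g : List (List (Option Char)),
      (ps.foldl (fun g q => pvSet2 g q.1.1 q.1.2 (some q.2)) g).length = g.length := by
  induction ps with
  | nil => intro g; rfl
  | cons q ps ih => intro g; rw [List.foldl_cons, ih, pv_length_pvSet2]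

theorem pv_assign_rowlen (C : Nat) (ps : List ((Int × Int) × Char)) :
    ∀ g : List (List (Option Char)), (∀ q ∈ ps, 0 ≤ q.1.1) → (∀ row ∈ g, row.length = C) →
      ∀ row ∈ ps.foldl (fun g q => pvSet2 g q.1.1 q.1.2 (some q.2)) g, row.length = C := by
  induction ps with
  | nil => intro g _ hrow; exact hrow
  | cons q ps ih =>
    intro g hpos hrow
    exact ih _ (fun q' hq' => hpos q' (List.mem_cons_of_mem _ hq'))
      (pv_rowlen_pvSet2 g C hrow q.1.1 q.1.2 (hpos q List.mem_cons_self) (some q.2))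

-- ===== VERDICT (by name: the statement is the Claim_ definition above) =====
theorem route_decrypt_spec : Claim_equal_route_decrypt := by
  intro cipher rows cols direction _hdom
  show route_decrypt cipher rows cols direction = route_decrypt_alt cipher rows cols direction
  by_cases hdeg : rows < 1 ∨ cols < 1
  · simp only [route_decrypt, route_decrypt_alt, if_pos hdeg]
  · simp only [route_decrypt, route_decrypt_alt, if_neg hdeg]
    have hr : (1 : Int) ≤ rows := by omega
    have hc : (1 : Int) ≤ cols := by omega
    have hn0 : (0 : Int) ≤ rows * cols := mul_nonneg (by omega) (by omega)
    rw [pv_pad_eq cipher.toList (rows * cols) hn0]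
    rw [pv_init_eq2 rows cols (none : Option Char), pv_init_eq2 rows cols false,
        pv_init_eq1 rows (List.replicate cols.toNat (none : Option Char))]
    rw [pv_spiralGo_eq_tail0 (by omega : (0:Int) ≤ rows - 1) (by omega : (0:Int) ≤ cols - 1)]
    set cs : List Char := PySem.List.slice cipher.toList none (some (rows * cols))
      ++ List.replicate (rows * cols - (PySem.List.slice cipher.toList none (some (rows * cols))).length).toNat 'X' with hcs
    have hcslen : cs.length = (rows * cols).toNat := pv_pad_len cipher.toList (rows * cols) hn0
    have htail0len : (pvTail0 0 (rows - 1) 0 (cols - 1) 0).length = (rows * cols).toNat := by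
      rw [← pv_spiralGo_eq_tail0 (by omega) (by omega),
          pv_length_spiralGo 0 (rows - 1) 0 (cols - 1) (by omega) (by omega),
          show (rows - 1 - 0 + 1) * (cols - 1 - 0 + 1) = rows * cols by ring]
    have hmain := pv_loopA_eq_assign rows cols cs 0 0 (rows - 1) 0 (cols - 1) 0
      (List.replicate rows.toNat (List.replicate cols.toNat (none : Option Char)))
      (List.replicate rows.toNat (List.replicate cols.toNat false))
      (by simp only [pvWf]; omega)
      (by simp) (by intro row hrow; simp at hrow; simp [hrow])
      (by
        intro i j h1 h2 h3 h4
        rw [pv_pvGet2_const rows.toNat cols.toNat false h1 (by omega) h3 (by omega) false]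
        have hm : ((i, j)) ∈ pvSfx 0 0 (rows - 1) 0 (cols - 1) 0 := by
          simp only [pvSfx]
          rw [pv_mem_tail0 _ (by omega) (by omega)]
          omega
        simp [hm])
      (by simp only [pvSfx]; omega)
    simp only [pvSfx, pvPos, Nat.cast_zero] at hmain
    rw [hmain]
    rw [pv_readA_eq_readB rows cols hr hc _
      (by rw [pv_assign_length]; simp)
      (pv_assign_rowlen cols.toNat _ _
        (by
          rintro ⟨⟨qi, qj⟩, qc⟩ hq
          have hq1 := (List.of_mem_zip hq).1
          rw [pv_mem_tail0 _ (by omega) (by omega)] at hq1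
          show (0 : Int) ≤ qi
          omega)
        (by intro row hrow; simp at hrow; simp [hrow]))]
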